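-- pv_equiv track=rewrite | github.com/bipentihexium/wys_arg_tools | wys_lib.py | intelligencecheck_encrypt
-- ===== SOURCE A (Python) =====
-- def intelligencecheck_encrypt(data:str, key:list) -> str:
-- 	"""encrypts data using the L5 algorithm"""
-- 	keyindex = 0
-- 	index = 0
-- 	result = "-" * len(data)
-- 	places = [i for i in range(len(result))]
-- 	for char in data:
-- 		index = ((index + key[keyindex]) % len(places) + len(places)) % len(places)
-- 		keyindex = (keyindex + 1) % len(key)
-- 		result = result[:places[index]] + char + result[places[index]+1:]
-- 		del places[index]
-- 	return result
-- ===== SOURCE B (Python) =====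
-- def intelligencecheck_encrypt(data: str, key: list) -> str:
-- 	"""encrypts data using the L5 algorithm (free-slot flags + char array)"""
-- 	n = len(data)
-- 	out = ["-"] * n
-- 	free = [True] * n
-- 	remaining = n
-- 	idx = 0
-- 	for i, ch in enumerate(data):
-- 		idx = (idx + key[i % len(key)]) % remaining
-- 		cnt = idx
-- 		for p in range(n):
-- 			if free[p]:
-- 				if cnt == 0:
-- 					out[p] = ch
-- 					free[p] = False
-- 					break
-- 				cnt -= 1
-- 		remaining -= 1
-- 	return "".join(out)
-- ===== Notes on version B (the rewrite author's own statement) =====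
-- stated objective: alternative
-- what changed: B replaces A's maintained free-position list (indexed and deleted each round) and per-step string slicing with a boolean free-slot array scanned for the k-th free position plus a mutable char array joined once at the end; Pre_ excludes nonempty data with an empty key, where A raises (IndexError/ZeroDivisionError).
import Mathlib
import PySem

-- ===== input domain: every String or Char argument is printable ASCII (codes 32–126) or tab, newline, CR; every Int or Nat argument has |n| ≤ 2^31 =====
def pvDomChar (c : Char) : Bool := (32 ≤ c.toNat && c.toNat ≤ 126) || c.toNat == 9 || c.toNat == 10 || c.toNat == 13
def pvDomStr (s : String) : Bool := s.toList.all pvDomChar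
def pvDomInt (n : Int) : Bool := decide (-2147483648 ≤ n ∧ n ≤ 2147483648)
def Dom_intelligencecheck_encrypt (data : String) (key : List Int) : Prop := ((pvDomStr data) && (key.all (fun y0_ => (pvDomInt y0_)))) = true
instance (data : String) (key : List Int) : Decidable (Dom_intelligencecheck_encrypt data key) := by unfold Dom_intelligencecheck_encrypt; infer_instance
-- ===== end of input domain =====

-- B replaces A's maintained free-position list (indexed and deleted each round) and per-step
-- string slicing by a boolean free-slot array scanned for the k-th free slot plus a char
-- array joined once at the end; objective: alternative (structurally different, same cost class).

-- ===== PORT A =====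
-- loop state: (keyindex, index, result chars, places); none = the Python raises
def pvALoop (key : List Int) : List Char → Int × Int × List Char × List Int →
    Option (Int × Int × List Char × List Int)
  | [], st => some st
  | c :: cs, (ki, idx, res, places) =>
    match PySem.List.pyGet? key ki with
    | none => none                                   -- key[keyindex]: IndexError
    | some k =>
      if (places.length : Int) = 0 then none         -- % len(places): ZeroDivisionError
      else
        let idx' := PySem.Int.mod (PySem.Int.mod (idx + k) (places.length : Int) +
                      (places.length : Int)) (places.length : Int)
        let ki' := PySem.Int.mod (ki + 1) (key.length : Int)
        match PySem.List.pyGet? places idx' with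
        | none => none                               -- places[index]: IndexError
        | some p =>
          let res' := PySem.List.slice res none (some p) ++ [c] ++
                      PySem.List.slice res (some (p + 1)) none
          match PySem.List.pop? places idx' with     -- del places[index]
          | none => none
          | some (_, places') => pvALoop key cs (ki', idx', res', places')

def intelligencecheck_encrypt (data : String) (key : List Int) : String :=
  let res := PySem.List.pyRepeat ['-'] (data.toList.length : Int)   -- "-" * len(data)
  let places := PySem.List.pyRange 0 (res.length : Int) 1
  match pvALoop key data.toList (0, 0, res, places) with
  | some (_, _, r, _) => String.ofList r
  | none => ""                                       -- unreachable under Pre_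

-- ===== PORT B =====
-- the inner "for p in range(n)" scan: walk out/free in step, place ch at the cnt-th free slot
def pvPlaceAt : List Char → List Bool → Nat → Char → List Char × List Bool
  | [], _, _, _ => ([], [])
  | _ :: _, [], _, _ => ([], [])
  | o :: os, f :: fs, cnt, ch =>
    if f then
      if cnt = 0 then (ch :: os, false :: fs)
      else
        let r := pvPlaceAt os fs (cnt - 1) ch
        (o :: r.1, f :: r.2)
    else
      let r := pvPlaceAt os fs cnt ch
      (o :: r.1, f :: r.2)

-- loop state: position i, idx, out chars, free flags, remaining
def pvBLoop (key : List Int) : List Char → Nat → Int → List Char → List Bool → Nat →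
    Option (List Char)
  | [], _, _, out, _, _ => some out
  | ch :: cs, i, idx, out, free, remaining =>
    match PySem.Int.mod? (i : Int) (key.length : Int) with
    | none => none                                   -- i % len(key): ZeroDivisionError
    | some j =>
      match PySem.List.pyGet? key j with
      | none => none
      | some k =>
        match PySem.Int.mod? (idx + k) (remaining : Int) with
        | none => none
        | some idx' =>
          let r := pvPlaceAt out free idx'.toNat ch
          pvBLoop key cs (i + 1) idx' r.1 r.2 (remaining - 1)

def intelligencecheck_encrypt_alt (data : String) (key : List Int) : String :=
  let n := data.toList.length
  match pvBLoop key data.toList 0 0 (List.replicate n '-') (List.replicate n true) n with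
  | some out => String.ofList out
  | none => ""                                       -- unreachable under Pre_

-- ===== PRECONDITION & SPEC =====
-- Pre_ excludes exactly nonempty data with an empty key, where the Python A raises
-- (IndexError on key[0], ZeroDivisionError on % len(key)); A returns normally everywhere else.
def Pre_intelligencecheck_encrypt (data : String) (key : List Int) : Prop :=
  key ≠ [] ∨ data = ""
instance (data : String) (key : List Int) : Decidable (Pre_intelligencecheck_encrypt data key) := by
  unfold Pre_intelligencecheck_encrypt; infer_instance

def pvWitness_intelligencecheck_encrypt : String × List Int := ("hello world", [3, -7, 100])

def Spec_intelligencecheck_encrypt (data : String) (key : List Int) (out : String) : Prop :=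
  out = intelligencecheck_encrypt_alt data key
instance (data : String) (key : List Int) (out : String) : Decidable (Spec_intelligencecheck_encrypt data key out) := by
  unfold Spec_intelligencecheck_encrypt; infer_instance

-- ===== CLAIM (what is proved, stated in full; the proofs are below) =====
def Claim_equal_intelligencecheck_encrypt : Prop :=
  ∀ (data : String) (key : List Int), Dom_intelligencecheck_encrypt data key →
    Pre_intelligencecheck_encrypt data key →
    Spec_intelligencecheck_encrypt data key (intelligencecheck_encrypt data key)

-- ===== LEMMAS AND PROOFS =====

-- the (Int-valued) positions of the free slots, in increasing order
def pvTruePos : List Bool → List Int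
  | [] => []
  | b :: bs => if b then 0 :: (pvTruePos bs).map (· + 1) else (pvTruePos bs).map (· + 1)

theorem pvTruePos_true (bs : List Bool) : pvTruePos (true :: bs) = 0 :: (pvTruePos bs).map (· + 1) := by
  simp [pvTruePos]
theorem pvTruePos_false (bs : List Bool) : pvTruePos (false :: bs) = (pvTruePos bs).map (· + 1) := by
  simp [pvTruePos]
theorem pvPlaceAt_true_zero (os : List Char) (fs : List Bool) (ch : Char) :
    pvPlaceAt (o :: os) (true :: fs) 0 ch = (ch :: os, false :: fs) := by simp [pvPlaceAt]
theorem pvPlaceAt_true_succ (os : List Char) (fs : List Bool) (m : Nat) (ch : Char) :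
    pvPlaceAt (o :: os) (true :: fs) (m + 1) ch =
      ((o :: (pvPlaceAt os fs m ch).1, true :: (pvPlaceAt os fs m ch).2)) := by simp [pvPlaceAt]
theorem pvPlaceAt_false (os : List Char) (fs : List Bool) (cnt : Nat) (ch : Char) :
    pvPlaceAt (o :: os) (false :: fs) cnt ch =
      ((o :: (pvPlaceAt os fs cnt ch).1, false :: (pvPlaceAt os fs cnt ch).2)) := by simp [pvPlaceAt]

theorem pvMap_eraseIdx {α β : Type} (f : α → β) (l : List α) (i : Nat) :
    (l.map f).eraseIdx i = (l.eraseIdx i).map f := by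
  induction l generalizing i with
  | nil => simp
  | cons x xs ih =>
    cases i with
    | zero => simp [List.eraseIdx]
    | succ j => simp [List.eraseIdx, ih]

theorem pvPlaceAt_spec (ch : Char) :
    ∀ (free : List Bool) (out : List Char) (cnt : Nat),
      out.length = free.length → (h : cnt < (pvTruePos free).length) →
      ∃ q : Nat, (pvTruePos free)[cnt] = (q : Int) ∧ q < out.length ∧
        pvPlaceAt out free cnt ch = (out.set q ch, free.set q false) ∧
        pvTruePos (free.set q false) = (pvTruePos free).eraseIdx cnt := by
  intro free
  induction free with
  | nil => intro out cnt _ h; simp [pvTruePos] at h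
  | cons b bs ih =>
    intro out cnt hlen h
    cases out with
    | nil => simp at hlen
    | cons o os =>
      simp only [List.length_cons] at hlen
      cases b with
      | true =>
        cases cnt with
        | zero =>
          exact ⟨0, by simp [pvTruePos_true], by simp, by rw [pvPlaceAt_true_zero]; simp,
            by simp [pvTruePos_false, pvTruePos_true]⟩
        | succ m =>
          rw [pvTruePos_true] at h
          simp only [List.length_cons, List.length_map] at h
          obtain ⟨q, hq, hqlt, hpl, her⟩ := ih os m (by omega) (by omega)
          refine ⟨q + 1, ?_, by simp only [List.length_cons]; omega, ?_, ?_⟩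
          · simp only [pvTruePos_true, List.getElem_cons_succ, List.getElem_map, hq]
            push_cast; ring
          · rw [pvPlaceAt_true_succ, hpl]
            simp [List.set]
          · simp only [List.set, pvTruePos_true, her, List.eraseIdx, pvMap_eraseIdx]
      | false =>
        rw [pvTruePos_false] at h
        simp only [List.length_map] at h
        obtain ⟨q, hq, hqlt, hpl, her⟩ := ih os cnt (by omega) h
        refine ⟨q + 1, ?_, by simp only [List.length_cons]; omega, ?_, ?_⟩
        · simp only [pvTruePos_false, List.getElem_map, hq]
          push_cast; ring
        · rw [pvPlaceAt_false, hpl]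
          simp [List.set]
        · simp only [List.set, pvTruePos_false, her, pvMap_eraseIdx]
theorem pvMod_shift (a R : Int) (hR : 0 < R) :
    PySem.Int.mod (PySem.Int.mod a R + R) R = PySem.Int.mod a R := by
  simp only [PySem.Int.mod_eq_emod_of_pos hR]
  have h1 : a % R + R = a % R + R * 1 := by ring
  rw [h1, Int.add_mul_emod_self_left, Int.emod_emod_of_dvd _ dvd_rfl]

theorem pvKi_step (i : Nat) (L : Int) (hL : 0 < L) :
    PySem.Int.mod (PySem.Int.mod (i : Int) L + 1) L = PySem.Int.mod ((i : Int) + 1) L := by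
  simp only [PySem.Int.mod_eq_emod_of_pos hL]
  conv_rhs => rw [Int.add_emod]
  rw [Int.add_emod (↑i % L) 1, Int.emod_emod_of_dvd _ dvd_rfl]

theorem pvLoop_eq (key : List Int) (hk : key ≠ []) :
    ∀ (cs : List Char) (i : Nat) (idx : Int) (out : List Char) (free : List Bool),
      out.length = free.length →
      cs.length ≤ (pvTruePos free).length →
      (pvALoop key cs (PySem.Int.mod (i : Int) (key.length : Int), idx, out, pvTruePos free)).map
          (fun st => st.2.2.1)
        = pvBLoop key cs i idx out free (pvTruePos free).length := by
  intro cs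
  induction cs with
  | nil => intro i idx out free _ _; simp [pvALoop, pvBLoop]
  | cons c cs ih =>
    intro i idx out free hlen hle
    have hL : 0 < (key.length : Int) := by
      have : key.length ≠ 0 := fun h => hk (List.eq_nil_of_length_eq_zero h)
      omega
    set R := (pvTruePos free).length with hRdef
    have hR : 0 < (R : Int) := by
      have : c :: cs ≠ [] := by simp
      simp only [List.length_cons] at hle
      omega
    -- key lookup on both sides
    have hmodi : PySem.Int.mod (i : Int) (key.length : Int) = ((i % key.length : Nat) : Int) := by
      exact_mod_cast PySem.Int.mod_natCast i key.length
    have hiL : i % key.length < key.length := Nat.mod_lt _ (by omega)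
    have hget : PySem.List.pyGet? key (PySem.Int.mod (i : Int) (key.length : Int))
        = some key[i % key.length] := by
      rw [hmodi, PySem.List.pyGet?_natCast, List.getElem?_eq_getElem hiL]
    have hmod? : PySem.Int.mod? (i : Int) (key.length : Int)
        = some (PySem.Int.mod (i : Int) (key.length : Int)) := by
      rw [PySem.Int.mod?, if_neg (by omega : ¬ ((key.length : Nat) : Int) = 0)]; rfl
    set k := key[i % key.length] with hkdef
    set idx' := PySem.Int.mod (idx + k) (R : Int) with hidx'
    have hmodB : PySem.Int.mod? (idx + k) ((R : Nat) : Int) = some idx' := by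
      rw [PySem.Int.mod?, if_neg (by omega : ¬ ((R : Nat) : Int) = 0)]; rfl
    have hshift : PySem.Int.mod (PySem.Int.mod (idx + k) ((pvTruePos free).length : Int) +
        ((pvTruePos free).length : Int)) ((pvTruePos free).length : Int) = idx' := by
      rw [← hRdef]; exact pvMod_shift _ _ hR
    have hnn : 0 ≤ idx' := PySem.Int.mod_nonneg _ hR
    have hltR : idx' < (R : Int) := PySem.Int.mod_lt _ hR
    set cnt := idx'.toNat with hcnt
    have hidxcast : idx' = ((cnt : Nat) : Int) := (Int.toNat_of_nonneg hnn).symm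
    have hcntR : cnt < R := by omega
    obtain ⟨q, hq, hqlt, hpl, her⟩ := pvPlaceAt_spec c free out cnt hlen (by omega)
    have hgetp : PySem.List.pyGet? (pvTruePos free) idx' = some ((q : Nat) : Int) := by
      rw [hidxcast, PySem.List.pyGet?_natCast, List.getElem?_eq_getElem hcntR, hq]
    have hpop : PySem.List.pop? (pvTruePos free) idx'
        = some ((pvTruePos free)[cnt], (pvTruePos free).eraseIdx cnt) := by
      rw [hidxcast]
      exact PySem.List.pop?_natCast _ _ hcntR
    have hres : PySem.List.slice out none (some ((q : Nat) : Int)) ++ [c] ++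
        PySem.List.slice out (some (((q : Nat) : Int) + 1)) none = out.set q c := by
      rw [PySem.List.slice_to_natCast]
      have : ((q : Nat) : Int) + 1 = (((q + 1 : Nat)) : Int) := by push_cast; ring
      rw [this, PySem.List.slice_from_natCast,
        List.set_eq_take_append_cons_drop, if_pos hqlt]
      simp
    have hlen' : (out.set q c).length = (free.set q false).length := by
      simp [hlen]
    have hlenE : (pvTruePos (free.set q false)).length = R - 1 := by
      rw [her, List.length_eraseIdx_of_lt hcntR]
    have hle' : cs.length ≤ (pvTruePos (free.set q false)).length := by
      simp only [List.length_cons] at hle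
      omega
    have := ih (i + 1) idx' (out.set q c) (free.set q false) hlen' hle'
    -- unfold one step of both loops
    simp only [pvALoop, pvBLoop, hget, hmod?, hmodB, hshift, hgetp, hpop, hres]
    have hR0 : ¬ (((pvTruePos free).length : Int) = 0) := by rw [← hRdef]; omega
    rw [if_neg hR0, pvKi_step i _ hL, ← her, ← hlenE]
    simp only [← hcnt, hpl]
    push_cast at this
    exact this

theorem pvTruePos_replicate (n : Nat) :
    pvTruePos (List.replicate n true) = (List.range n).map Int.ofNat := by
  induction n with
  | zero => simp [pvTruePos]
  | succ m ih =>
    rw [List.replicate_succ, pvTruePos_true, ih, List.range_succ_eq_map, List.map_cons,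
        List.map_map, List.map_map]
    refine congrArg₂ List.cons rfl (List.map_congr_left fun a _ => ?_)
    simp

theorem pvTruePos_replicate_length (n : Nat) :
    (pvTruePos (List.replicate n true)).length = n := by
  rw [pvTruePos_replicate]; simp

theorem intelligencecheck_encrypt_spec : Claim_equal_intelligencecheck_encrypt := by
  unfold Claim_equal_intelligencecheck_encrypt
  intro data key _ hpre
  unfold Spec_intelligencecheck_encrypt
  rcases hpre with hk | hempty
  · -- key ≠ []
    unfold intelligencecheck_encrypt intelligencecheck_encrypt_alt
    have hrep : PySem.List.pyRepeat ['-'] ((data.toList.length : Nat) : Int)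
        = List.replicate data.toList.length '-' := by
      rw [PySem.List.pyRepeat_singleton]; simp
    have hplaces : PySem.List.pyRange 0 ((List.replicate data.toList.length '-').length : Int) 1
        = pvTruePos (List.replicate data.toList.length true) := by
      apply List.ext_getElem
      · rw [PySem.List.length_pyRange_one, pvTruePos_replicate_length]; simp
      · intro i h1 h2
        rw [PySem.List.getElem_pyRange_one]
        simp only [pvTruePos_replicate, List.getElem_map, List.getElem_range]
        simp
    have hmod0 : PySem.Int.mod ((0 : Nat) : Int) (key.length : Int) = 0 := by
      have := PySem.Int.mod_natCast 0 key.length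
      simpa using this
    have E := pvLoop_eq key hk data.toList 0 0 (List.replicate data.toList.length '-')
      (List.replicate data.toList.length true) (by simp)
      (by rw [pvTruePos_replicate_length])
    rw [hmod0, pvTruePos_replicate_length] at E
    simp only [hrep, hplaces]
    cases hA : pvALoop key data.toList (0, 0, List.replicate data.toList.length '-',
        pvTruePos (List.replicate data.toList.length true)) with
    | none =>
      rw [hA, Option.map_none] at E
      rw [← E]
    | some st =>
      rw [hA, Option.map_some] at E
      rw [← E]
  · -- data = ""
    subst hempty
    rfl
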